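-- pv_equiv track=rewrite | github.com/rash1993/movie-asd | src/video_prep/video_utils.py | getShotWiseTracks
-- ===== SOURCE A (Python) =====
-- def getShotWiseTracks(tracks):
--     shotWiseTracks = {}
--     for track in tracks.keys():
--         shotId = track.split('_')[0]
--         if shotId in shotWiseTracks.keys():
--             shotWiseTracks[shotId].append(track)
--         else:
--             shotWiseTracks[shotId] = [track]
--     return shotWiseTracks
-- ===== SOURCE B (Python) =====
-- def getShotWiseTracks(tracks):
--     keys = list(tracks.keys())
--     shotIds = []
--     for t in keys:
--         s = t.split('_')[0]
--         if s not in shotIds: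
--             shotIds.append(s)
--     return {s: [t for t in keys if t.split('_')[0] == s] for s in shotIds}
-- ===== Notes on version B (the rewrite author's own statement) =====
-- stated objective: alternative
-- what changed: Replaces the single-pass dict-of-lists accumulation with a two-phase scheme: first collect the distinct shot-id prefixes in first-occurrence order, then build each group by filtering the key list per prefix.
import Mathlib
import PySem

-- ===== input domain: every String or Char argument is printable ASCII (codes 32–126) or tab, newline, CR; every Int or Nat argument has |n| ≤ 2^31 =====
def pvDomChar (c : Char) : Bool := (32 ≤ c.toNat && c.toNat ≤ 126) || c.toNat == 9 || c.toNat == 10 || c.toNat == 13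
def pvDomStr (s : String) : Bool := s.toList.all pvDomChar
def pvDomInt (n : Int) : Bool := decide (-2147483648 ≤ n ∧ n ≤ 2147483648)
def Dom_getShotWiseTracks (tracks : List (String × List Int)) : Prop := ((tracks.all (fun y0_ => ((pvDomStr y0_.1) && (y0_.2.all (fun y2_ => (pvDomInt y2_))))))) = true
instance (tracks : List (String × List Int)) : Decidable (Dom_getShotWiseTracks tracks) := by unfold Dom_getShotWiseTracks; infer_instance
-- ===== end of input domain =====

-- B replaces A's single-pass dict-of-lists accumulation by a two-phase scheme (collect distinct
-- prefixes in first-occurrence order, then filter the key list once per prefix): objective 'alternative'.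

-- track.split('_')[0]: split? is some because the separator "_" is nonempty, and the result is
-- nonempty, so indexing at 0 is exact (headD never hits its default).
def pvShotId (track : String) : String := ((PySem.Str.split? track "_").getD []).headD ""

-- ===== PORT A =====
def getShotWiseTracks (tracks : List (String × List Int)) : List (String × List String) :=
  (tracks.foldl (fun shotWiseTracks p =>
      let track := p.1
      let shotId := pvShotId track
      if shotWiseTracks.contains shotId then
        -- d[shotId].append(track): in-place append keeps the key's position = modify
        shotWiseTracks.modify shotId [] (· ++ [track])
      else
        shotWiseTracks.insert shotId [track])
    (PySem.Dict.empty : PySem.Dict String (List String))).items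

-- ===== PORT B =====
def getShotWiseTracks_alt (tracks : List (String × List Int)) : List (String × List String) :=
  let keys := tracks.map (·.1)
  -- 'if s not in shotIds: shotIds.append(s)' is exactly PySem.Set.add
  let shotIds : PySem.Set String := keys.foldl (fun acc t => PySem.Set.add acc (pvShotId t)) []
  shotIds.map (fun s => (s, keys.filter (fun t => pvShotId t == s)))

-- ===== PRECONDITION & SPEC =====
def Spec_getShotWiseTracks (tracks : List (String × List Int)) (out : List (String × List String)) : Prop := out = getShotWiseTracks_alt tracks
instance (tracks : List (String × List Int)) (out : List (String × List String)) : Decidable (Spec_getShotWiseTracks tracks out) := by unfold Spec_getShotWiseTracks; infer_instance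

-- ===== CLAIM (what is proved, stated in full; the proofs are below) =====
def Claim_equal_getShotWiseTracks : Prop := ∀ (tracks : List (String × List Int)), Dom_getShotWiseTracks tracks → Spec_getShotWiseTracks tracks (getShotWiseTracks tracks)

-- ===== LEMMAS AND PROOFS =====

-- A's if/else branch is exactly one 'modify' step.
theorem pvStep_eq_modify (d : PySem.Dict String (List String)) (k v : String) :
    (if d.contains k then d.modify k [] (· ++ [v]) else d.insert k [v]) =
      d.modify k [] (· ++ [v]) := by
  by_cases h : d.contains k
  · simp [h]
  · simp only [h, PySem.Dict.modify,
      PySem.Dict.getD_of_not_contains _ _ (by simpa using h), List.nil_append]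
    simp

-- A's accumulation loop, rewritten as a pure modify-loop keyed by pvShotId.
theorem pvA_eq_modify_loop (tracks : List (String × List Int)) :
    getShotWiseTracks tracks =
      (((tracks.map (·.1)).foldl
          (fun d t => d.modify (pvShotId t) [] (· ++ [t]))
          (PySem.Dict.empty : PySem.Dict String (List String)))).items := by
  unfold getShotWiseTracks
  rw [List.foldl_map]
  congr 1
  apply PySem.List.foldl_congr_mem
  intro d p _
  exact pvStep_eq_modify d (pvShotId p.1) p.1

theorem getShotWiseTracks_spec_aux (tracks : List (String × List Int)) :
    getShotWiseTracks tracks = getShotWiseTracks_alt tracks := by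
  rw [pvA_eq_modify_loop]
  set keys := tracks.map (·.1) with hkeys
  set loop := keys.foldl (fun d t => d.modify (pvShotId t) [] (· ++ [t]))
      (PySem.Dict.empty : PySem.Dict String (List String)) with hloop
  have hnd : loop.keys.Nodup := by
    rw [hloop]
    exact PySem.Dict.nodup_keys_foldl_modify_key keys pvShotId [] (fun _ t l => l ++ [t]) _
      (by simp)
  have hkeysA : loop.keys = PySem.Set.ofList (keys.map pvShotId) := by
    rw [hloop, PySem.Dict.keys_foldl_modify_key keys pvShotId [] (fun _ t l => l ++ [t])]
    simp [PySem.Set.update_nil_left]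
  have hget : ∀ c, loop.getD c [] = keys.filter (fun t => pvShotId t == c) := by
    intro c
    have hsplit : loop = (keys.map (fun t => (pvShotId t, t))).foldl
        (fun d p => d.modify p.1 [] (· ++ [p.2]))
        (PySem.Dict.empty : PySem.Dict String (List String)) := by
      rw [hloop]; simp only [List.foldl_map]
    rw [hsplit, PySem.Dict.getD_foldl_modify_append]
    simp [PySem.Dict.getD_empty, List.filter_map, List.map_map, Function.comp_def]
  rw [PySem.Dict.items_eq_map_keys loop hnd [], hkeysA]
  show List.map (fun k => (k, loop.getD k [])) (PySem.Set.ofList (keys.map pvShotId)) =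
    List.map (fun s => (s, keys.filter (fun t => pvShotId t == s)))
      (keys.foldl (fun acc t => PySem.Set.add acc (pvShotId t)) [])
  rw [← PySem.Set.update_map_eq_foldl_add, PySem.Set.update_nil_left]
  apply List.map_congr_left
  intro s _
  exact congrArg (Prod.mk s) (hget s)

-- ===== VERDICT (by name: the statement is the Claim_ definition above) =====
theorem getShotWiseTracks_spec : Claim_equal_getShotWiseTracks := by
  intro tracks _
  exact getShotWiseTracks_spec_aux tracks
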